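-- pv_equiv track=rewrite | github.com/pdg137/adventofcode | 2023/prob03_2.py | get_num_positions
-- ===== SOURCE A (Python) =====
-- def isdigit(c):
--     return ord(c) >= ord("0") and ord(c) <= ord("9")
--
-- def get_num_positions(s):
--     start = -1
--     for i, c in enumerate(s):
--         if start == -1:
--             if isdigit(c):
--                 start = i
--         else:
--             if not isdigit(c):
--                 yield (start, i, int(s[start:i]))
--                 start = -1
--     if start != -1:
--         yield (start, i+1, int(s[start:i+1]))
-- ===== SOURCE B (Python) =====
-- def get_num_positions(s):
--     i, n = 0, len(s)
--     while i < n: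
--         if '0' <= s[i] <= '9':
--             j = i
--             while j < n and '0' <= s[j] <= '9':
--                 j += 1
--             yield (i, j, int(s[i:j]))
--             i = j
--         else:
--             i += 1
-- ===== Notes on version B (the rewrite author's own statement) =====
-- stated objective: alternative
-- what changed: A is a single enumerate pass driven by a start/-1 flag state machine with flush logic; B is a two-level scanner: an outer index loop that, on hitting a digit, runs an inner scan to the end of the maximal digit run and yields it in one step.
import Mathlib
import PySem

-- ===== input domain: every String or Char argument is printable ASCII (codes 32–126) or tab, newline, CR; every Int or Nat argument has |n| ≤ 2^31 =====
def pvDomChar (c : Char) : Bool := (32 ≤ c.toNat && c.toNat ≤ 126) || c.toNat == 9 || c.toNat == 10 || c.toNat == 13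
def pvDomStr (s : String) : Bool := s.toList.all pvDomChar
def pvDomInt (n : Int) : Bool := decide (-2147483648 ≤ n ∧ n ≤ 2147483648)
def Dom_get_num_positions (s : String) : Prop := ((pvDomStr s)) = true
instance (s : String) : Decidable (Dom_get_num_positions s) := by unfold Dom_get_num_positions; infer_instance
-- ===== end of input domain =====

-- B replaces A's one-pass start/-1 flag state machine with a two-level scanner that
-- groups maximal digit runs directly (alternative decomposition, same O(n) cost).


-- ===== PORT A =====
-- isdigit(c) of the source module: ord-range check on ASCII digits
def pyIsdigit (c : Char) : Bool := decide ('0'.toNat ≤ c.toNat) && decide (c.toNat ≤ '9'.toNat)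

-- int(cs[a:b]); at every call site the slice is a nonempty all-digit run, so ofChars? is
-- always `some` there and the `.getD 0` default is unreachable
def sliceInt (cs : List Char) (a b : Int) : Int :=
  (PySem.Int.ofChars? (PySem.List.slice cs (some a) (some b))).getD 0

-- the body of A's `for i, c in enumerate(s)` loop, state = (start, yielded-so-far)
def stepA (cs : List Char) (st : Int × List (Int × Int × Int)) (ic : Int × Char) :
    Int × List (Int × Int × Int) :=
  if st.1 == -1 then
    if pyIsdigit ic.2 then (ic.1, st.2) else st
  else
    if !pyIsdigit ic.2 then (-1, st.2 ++ [(st.1, ic.1, sliceInt cs st.1 ic.1)]) else st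

def get_num_positions (s : String) : List (Int × Int × Int) :=
  let cs := s.toList
  let r := (PySem.List.enumerate cs 0).foldl (stepA cs) (-1, [])
  if r.1 != -1 then
    -- after the loop, i = len(s) - 1 (only reached when the loop ran)
    let i : Int := (cs.length : Int) - 1
    r.2 ++ [(r.1, i + 1, sliceInt cs r.1 (i + 1))]
  else r.2

-- ===== PORT B =====
-- int(s[i:j]) on the digit run (the inner while's span)
def runVal (ds : List Char) : Int := (PySem.Int.ofChars? ds).getD 0

-- B's outer while-loop over the suffix starting at index i; the inner while is the
-- takeWhile/dropWhile split of the maximal digit run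
def bRuns : List Char → Nat → List (Int × Int × Int)
  | [], _ => []
  | c :: rest, i =>
    if h : pyIsdigit c then
      let ds := (c :: rest).takeWhile pyIsdigit
      ((i : Int), (i : Int) + (ds.length : Int), runVal ds) ::
        bRuns ((c :: rest).dropWhile pyIsdigit) (i + ds.length)
    else
      bRuns rest (i + 1)
termination_by cs _ => cs.length
decreasing_by
  · have := List.length_dropWhile_le pyIsdigit rest
    simp [h]; omega
  · simp

def get_num_positions_alt (s : String) : List (Int × Int × Int) := bRuns s.toList 0

-- ===== PRECONDITION & SPEC =====
def Spec_get_num_positions (s : String) (out : List (Int × Int × Int)) : Prop := out = get_num_positions_alt s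
instance (s : String) (out : List (Int × Int × Int)) : Decidable (Spec_get_num_positions s out) := by unfold Spec_get_num_positions; infer_instance

-- ===== CLAIM (what is proved, stated in full; the proofs are below) =====
def Claim_equal_get_num_positions : Prop := ∀ (s : String), Dom_get_num_positions s → Spec_get_num_positions s (get_num_positions s)

-- ===== LEMMAS AND PROOFS =====

-- the tail of A (loop from index i plus the final flush), for both loop states
def tailA (cs0 : List Char) (st0 : Int × List (Int × Int × Int)) (cs : List Char) (i : Nat) :
    List (Int × Int × Int) :=
  let r := (PySem.List.enumerate cs (i : Int)).foldl (stepA cs0) st0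
  if r.1 != -1 then
    r.2 ++ [(r.1, ((cs0.length : Int) - 1) + 1, sliceInt cs0 r.1 (((cs0.length : Int) - 1) + 1))]
  else r.2

lemma natcast_bne_neg_one (j : Nat) : (((j : Int)) != -1) = true := by
  rw [bne_iff_ne]; omega

lemma sliceInt_run (cs0 pre rest : List Char) (j : Nat) (h : cs0.drop j = pre ++ rest) :
    sliceInt cs0 (j : Int) ((j : Int) + ((pre.length : Nat) : Int)) = runVal pre := by
  unfold sliceInt runVal
  rw [PySem.List.slice_natCast_add, h]
  simp

lemma mainA (cs0 : List Char) : ∀ (cs : List Char) (i : Nat) (acc : List (Int × Int × Int)),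
    cs0.drop i = cs →
    (tailA cs0 (-1, acc) cs i = acc ++ bRuns cs i) ∧
    (∀ (j : Nat) (pre : List Char), cs0.drop j = pre ++ cs → pre ≠ [] →
      pre.all pyIsdigit → i = j + pre.length →
      tailA cs0 ((j : Int), acc) cs i =
        acc ++ (((j : Int), (j : Int) + ((pre.length + (cs.takeWhile pyIsdigit).length : Nat) : Int),
                 runVal (pre ++ cs.takeWhile pyIsdigit)) ::
                bRuns (cs.dropWhile pyIsdigit) (j + (pre.length + (cs.takeWhile pyIsdigit).length)))) := by
  intro cs
  induction cs with
  | nil =>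
    intro i acc h
    constructor
    · simp [tailA, PySem.List.enumerate_nil, bRuns]
    · intro j pre hdrop hpre hdig hi
      simp only [List.append_nil] at hdrop
      have hj : j + pre.length = cs0.length := by
        have hlen := List.length_drop (l := cs0) (i := j)
        rw [hdrop] at hlen
        have : pre.length ≠ 0 := by simpa using hpre
        omega
      have hend : ((cs0.length : Int) - 1) + 1 = (j : Int) + ((pre.length : Nat) : Int) := by omega
      simp only [tailA, PySem.List.enumerate_nil, List.foldl_nil, natcast_bne_neg_one, if_true,
        bRuns, List.takeWhile_nil, List.dropWhile_nil, hend]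
      rw [sliceInt_run cs0 pre [] j (by simpa using hdrop)]
      simp
  | cons c cs' ih =>
    intro i acc h
    have h' : cs0.drop (i + 1) = cs' := by
      rw [← List.tail_drop, h]; rfl
    constructor
    · by_cases hd : pyIsdigit c
      · have hb := ((ih (i + 1) acc h').2) i [c] (by simpa using h) (by simp)
          (by simp [hd]) (by simp)
        simp only [tailA, PySem.List.enumerate_cons, List.foldl_cons, stepA, hd] at hb ⊢
        push_cast at hb ⊢
        simp at hb ⊢
        rw [show (1 : Int) + ((List.takeWhile pyIsdigit cs').length : Int)
              = ((List.takeWhile pyIsdigit cs').length : Int) + 1 by ring] at hb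
        rw [show i + (1 + (List.takeWhile pyIsdigit cs').length)
              = i + ((List.takeWhile pyIsdigit cs').length + 1) by ring] at hb
        simp [bRuns, hd]
        exact hb
      · have ha := ((ih (i + 1) acc h').1)
        simp only [tailA, PySem.List.enumerate_cons, List.foldl_cons, stepA, hd] at ha ⊢
        push_cast at ha ⊢
        simp [bRuns, hd]
        simpa using ha
    · intro j pre hdrop hpre hdig hi
      by_cases hd : pyIsdigit c
      · have hb := ((ih (i + 1) acc h').2) j (pre ++ [c])
          (by simpa using hdrop) (by simp) (by simp [hd, List.all_append] at hdig ⊢; exact hdig)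
          (by simp; omega)
        simp only [tailA, PySem.List.enumerate_cons, List.foldl_cons, stepA, hd] at hb ⊢
        push_cast at hb ⊢
        simp only [List.takeWhile_cons, List.dropWhile_cons, hd, if_true] at hb ⊢
        simp at hb ⊢
        have e1 : ((pre.length : Int)) + (((List.takeWhile pyIsdigit cs').length : Int) + 1)
            = ((pre.length : Int)) + 1 + ((List.takeWhile pyIsdigit cs').length : Int) := by ring
        have e2 : pre.length + ((List.takeWhile pyIsdigit cs').length + 1)
            = pre.length + 1 + (List.takeWhile pyIsdigit cs').length := by omega
        rw [e1, e2]; exact hb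
      · have hflush := ((ih (i + 1)
          (acc ++ [((j : Int), (i : Int), sliceInt cs0 (j : Int) (i : Int))]) h').1)
        simp only [tailA, PySem.List.enumerate_cons, List.foldl_cons, stepA, hd] at hflush ⊢
        push_cast at hflush ⊢
        simp at hflush ⊢
        rw [hflush]
        have hi' : (i : Int) = (j : Int) + ((pre.length : Nat) : Int) := by omega
        rw [hi', sliceInt_run cs0 pre (c :: cs') j hdrop]
        simp [bRuns, hd, hi]

-- ===== VERDICT (by name: the statement is the Claim_ definition above) =====
theorem get_num_positions_spec : Claim_equal_get_num_positions := by
  intro s _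
  show get_num_positions s = get_num_positions_alt s
  exact (mainA s.toList s.toList 0 [] rfl).1
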